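-- pv_equiv track=rewrite | github.com/soyukke/lean-unsolved | scripts/collatz_cf_correlation2.py | collatz_orbit_detailed
-- ===== SOURCE A (Python) =====
-- def collatz_orbit_detailed(n):
--     """軌道の詳細情報を返す"""
--     u, d = 0, 0
--     v2_list = []
--     while n != 1:
--         if n % 2 == 0:
--             n //= 2
--             d += 1
--         else:
--             val = 3 * n + 1
--             v2 = 0
--             while val % 2 == 0:
--                 val //= 2
--                 v2 += 1
--             v2_list.append(v2)
--             n = val
--             u += 1
--             d += v2
--     return u, d, v2_list
-- ===== SOURCE B (Python) =====
-- def collatz_orbit_detailed(n):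
--     """軌道の詳細情報を返す"""
--     # Build the raw Collatz trajectory with the textbook one-step map.
--     orbit = [n]
--     while orbit[-1] != 1:
--         m = orbit[-1]
--         orbit.append(3 * m + 1 if m % 2 else m // 2)
--     # Step parities: 1 = odd (3x+1) step, 0 = halving step.
--     steps = [m % 2 for m in orbit[:-1]]
--     u = sum(steps)
--     d = len(steps) - u
--     # Run-length encode: each odd step's v2 is the run of halvings after it.
--     v2_list = []
--     run = None            # halvings before the first odd step belong to no v2
--     for s in steps:
--         if s:
--             if run is not None:
--                 v2_list.append(run)
--             run = 0
--         else:
--             if run is not None: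
--                 run += 1
--     if run is not None:
--         v2_list.append(run)
--     return u, d, v2_list
-- ===== Notes on version B (the rewrite author's own statement) =====
-- stated objective: alternative
-- what changed: B materializes the full Collatz trajectory with the textbook one-step map (no inner stripping loop, no fused counters), then derives u and d from the list of step parities and recovers v2_list by run-length-encoding the runs of halving steps that follow each odd step.
import Mathlib
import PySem

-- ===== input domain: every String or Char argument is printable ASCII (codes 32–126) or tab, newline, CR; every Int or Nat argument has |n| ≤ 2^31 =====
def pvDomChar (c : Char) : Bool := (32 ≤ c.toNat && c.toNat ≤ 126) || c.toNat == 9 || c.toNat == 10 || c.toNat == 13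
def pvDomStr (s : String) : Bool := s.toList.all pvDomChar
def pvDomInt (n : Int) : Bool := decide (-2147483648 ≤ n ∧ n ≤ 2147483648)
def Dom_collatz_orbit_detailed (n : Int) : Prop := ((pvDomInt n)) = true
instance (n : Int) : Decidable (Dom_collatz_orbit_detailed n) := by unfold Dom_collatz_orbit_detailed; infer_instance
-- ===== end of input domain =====

-- B replaces A's fused counting loop by materializing the raw Collatz trajectory with the
-- textbook one-step map and then run-length-encoding the step parities (objective: alternative,
-- same asymptotic cost). Both while-loops are ported with a fuel parameter consumed once per
-- 3n+1 step; the equivalence proof never needs the fuel to suffice (the ports run out in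
-- lockstep and return the state reached so far).

-- termination helper for the halving steps (cited by decreasing_by)
theorem pvHalfLt (v : Int) (h0 : v ≠ 0) (h2 : PySem.Int.mod v 2 = 0) :
    (PySem.Int.floordiv v 2).natAbs < v.natAbs := by
  rw [PySem.Int.floordiv_eq_ediv_of_pos (by omega)]
  rw [PySem.Int.mod_eq_zero_iff_dvd] at h2
  obtain ⟨k, hk⟩ := h2
  subst hk
  rw [Int.mul_ediv_cancel_left _ (by omega)]
  omega

def pvFuel : Nat := 1000000

-- ===== PORT A =====
-- A's inner `while val % 2 == 0` loop (the `val ≠ 0` guard only makes the def total;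
-- Python diverges at val = 0, which is unreachable from val = 3*n+1).
def pvStripA (val : Int) (v2 : Int) : Int × Int :=
  if h : PySem.Int.mod val 2 = 0 ∧ val ≠ 0 then
    pvStripA (PySem.Int.floordiv val 2) (v2 + 1)
  else (val, v2)
termination_by val.natAbs
decreasing_by exact pvHalfLt val h.2 h.1

-- A's outer `while n != 1` loop; each odd step consumes one unit of fuel, even steps
-- decrease |n| (the n = 0 even case, where Python diverges, just stops).
def pvLoopA (fuel : Nat) (n u d : Int) (acc : List Int) : Int × Int × List Int :=
  if n = 1 then (u, d, acc)
  else if hm : PySem.Int.mod n 2 = 0 then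
    if hz : n = 0 then (u, d, acc)
    else pvLoopA fuel (PySem.Int.floordiv n 2) u (d + 1) acc
  else
    match fuel with
    | 0 => (u, d, acc)
    | f + 1 =>
      let s := pvStripA (3 * n + 1) 0
      pvLoopA f s.1 (u + 1) (d + s.2) (acc ++ [s.2])
termination_by (fuel, n.natAbs)
decreasing_by
  · exact Prod.Lex.right fuel (pvHalfLt n hz hm)
  · exact Prod.Lex.left _ _ (Nat.lt_succ_self f)

def collatz_orbit_detailed (n : Int) : Int × Int × List Int :=
  pvLoopA pvFuel n 0 0 []

-- ===== PORT B =====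
-- B's `while orbit[-1] != 1` loop, producing the trajectory starting at m (m included).
-- The odd branch is tried first, as in Source B's `3 * m + 1 if m % 2 else m // 2`;
-- fuel is consumed on odd steps only, the m = 0 guard only makes the def total.
def pvOrbit (fuel : Nat) (m : Int) : List Int :=
  if m = 1 then [1]
  else if hodd : PySem.Int.mod m 2 ≠ 0 then
    match fuel with
    | 0 => [m]
    | f + 1 => m :: pvOrbit f (3 * m + 1)
  else if hz : m = 0 then [0]
  else m :: pvOrbit fuel (PySem.Int.floordiv m 2)
termination_by (fuel, m.natAbs)
decreasing_by
  · exact Prod.Lex.left _ _ (Nat.lt_succ_self f)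
  · exact Prod.Lex.right fuel (pvHalfLt m hz (by omega))

-- `steps = [m % 2 for m in orbit[:-1]]`
def pvSteps (orbit : List Int) : List Int :=
  orbit.dropLast.map (fun m => PySem.Int.mod m 2)

-- one iteration of Source B's `for s in steps` run-length loop; state = (run, v2_list)
def pvRleStep (st : Option Int × List Int) (s : Int) : Option Int × List Int :=
  if s ≠ 0 then
    match st.1 with
    | some r => (some 0, st.2 ++ [r])
    | none => (some 0, st.2)
  else
    match st.1 with
    | some r => (some (r + 1), st.2)
    | none => (none, st.2)

-- Source B's final `if run is not None: v2_list.append(run)`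
def pvFlush (st : Option Int × List Int) : List Int :=
  match st.1 with
  | some r => st.2 ++ [r]
  | none => st.2

def collatz_orbit_detailed_alt (n : Int) : Int × Int × List Int :=
  let orbit := pvOrbit pvFuel n
  let steps := pvSteps orbit
  let u := steps.sum
  let d := (steps.length : Int) - u
  (u, d, pvFlush (steps.foldl pvRleStep (none, [])))

-- ===== PRECONDITION & SPEC =====
-- Pre_ excludes n ≤ 0, on which Python A never returns (the loop diverges: n = 0 halves
-- forever, negative n enters a negative cycle and never reaches 1).
def Pre_collatz_orbit_detailed (n : Int) : Prop := 1 ≤ n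
instance (n : Int) : Decidable (Pre_collatz_orbit_detailed n) := by unfold Pre_collatz_orbit_detailed; infer_instance
def pvWitness_collatz_orbit_detailed : Int := 7

def Spec_collatz_orbit_detailed (n : Int) (out : Int × Int × List Int) : Prop := out = collatz_orbit_detailed_alt n
instance (n : Int) (out : Int × Int × List Int) : Decidable (Spec_collatz_orbit_detailed n out) := by unfold Spec_collatz_orbit_detailed; infer_instance

-- ===== CLAIM (what is proved, stated in full; the proofs are below) =====
def Claim_equal_collatz_orbit_detailed : Prop := ∀ (n : Int), Dom_collatz_orbit_detailed n → Pre_collatz_orbit_detailed n → Spec_collatz_orbit_detailed n (collatz_orbit_detailed n)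

-- ===== LEMMAS AND PROOFS =====

-- B's output from a given loop state, for the induction through A's loop.
def pvMerge (u d : Int) (acc : List Int) (orbit : List Int) : Int × Int × List Int :=
  (u + (pvSteps orbit).sum, d + (((pvSteps orbit).length : Int) - (pvSteps orbit).sum),
   pvFlush ((pvSteps orbit).foldl pvRleStep (none, acc)))

theorem pvOrbit_ne_nil (fuel : Nat) (m : Int) : pvOrbit fuel m ≠ [] := by
  rw [pvOrbit.eq_def]
  split_ifs <;> (try simp) <;> cases fuel <;> simp

theorem pvSteps_cons (a : Int) (O : List Int) (h : O ≠ []) :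
    pvSteps (a :: O) = PySem.Int.mod a 2 :: pvSteps O := by
  simp [pvSteps, List.dropLast_cons_of_ne_nil h]

theorem stripA_shift (val : Int) : ∀ c : Int,
    (pvStripA val c).1 = (pvStripA val 0).1 ∧ (pvStripA val c).2 = c + (pvStripA val 0).2 := by
  induction hm : val.natAbs using Nat.strong_induction_on generalizing val with
  | _ m ih =>
    intro c
    by_cases h : PySem.Int.mod val 2 = 0 ∧ val ≠ 0
    · have hlt := pvHalfLt val h.2 h.1
      have e1 : pvStripA val c = pvStripA (PySem.Int.floordiv val 2) (c + 1) := by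
        rw [pvStripA]; exact dif_pos h
      have e0 : pvStripA val 0 = pvStripA (PySem.Int.floordiv val 2) (0 + 1) := by
        rw [pvStripA]; exact dif_pos h
      obtain ⟨a1, a2⟩ := ih _ (hm ▸ hlt) (PySem.Int.floordiv val 2) rfl (c + 1)
      obtain ⟨b1, b2⟩ := ih _ (hm ▸ hlt) (PySem.Int.floordiv val 2) rfl (0 + 1)
      rw [e1, e0, a1, a2, b1, b2]
      exact ⟨rfl, by ring⟩
    · have e1 : pvStripA val c = (val, c) := by rw [pvStripA]; exact dif_neg h
      have e0 : pvStripA val 0 = (val, 0) := by rw [pvStripA]; exact dif_neg h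
      rw [e1, e0]
      exact ⟨rfl, by ring⟩

theorem stripA_props (val : Int) (h0 : 0 < val) :
    0 < (pvStripA val 0).1 ∧ PySem.Int.mod (pvStripA val 0).1 2 ≠ 0 ∧ 0 ≤ (pvStripA val 0).2 := by
  induction hm : val.natAbs using Nat.strong_induction_on generalizing val with
  | _ m ih =>
    by_cases h : PySem.Int.mod val 2 = 0 ∧ val ≠ 0
    · have hlt := pvHalfLt val h.2 h.1
      have hdvd := h.1
      rw [PySem.Int.mod_eq_zero_iff_dvd] at hdvd
      obtain ⟨k, hk⟩ := hdvd
      have hfd : PySem.Int.floordiv val 2 = k := by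
        rw [hk, PySem.Int.floordiv_eq_ediv_of_pos (by omega), Int.mul_ediv_cancel_left _ (by omega)]
      have hkpos : 0 < k := by omega
      have e : pvStripA val 0 = pvStripA k (0 + 1) := by
        rw [pvStripA]; rw [dif_pos h, hfd]
      obtain ⟨p1, p2, p3⟩ := ih _ (hm ▸ (hfd ▸ hlt)) k hkpos rfl
      obtain ⟨e1, e2⟩ := stripA_shift k (0 + 1)
      rw [e, e1, e2]
      exact ⟨p1, p2, by omega⟩
    · have e : pvStripA val 0 = (val, 0) := by rw [pvStripA]; exact dif_neg h
      rw [e]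
      refine ⟨h0, ?_, le_refl 0⟩
      intro hmod
      have := h ⟨hmod, by omega⟩
      exact this

theorem steps_strip (val : Int) (h0 : 0 < val) (fuel : Nat) :
    pvSteps (pvOrbit fuel val) =
      List.replicate (pvStripA val 0).2.toNat 0 ++ pvSteps (pvOrbit fuel (pvStripA val 0).1) := by
  induction hm : val.natAbs using Nat.strong_induction_on generalizing val with
  | _ m ih =>
    by_cases h : PySem.Int.mod val 2 = 0 ∧ val ≠ 0
    · have h1 : val ≠ 1 := by
        intro hh; subst hh; simp [PySem.Int.mod] at h
      have hdvd := h.1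
      rw [PySem.Int.mod_eq_zero_iff_dvd] at hdvd
      obtain ⟨k, hk⟩ := hdvd
      have hfd : PySem.Int.floordiv val 2 = k := by
        rw [hk, PySem.Int.floordiv_eq_ediv_of_pos (by omega), Int.mul_ediv_cancel_left _ (by omega)]
      have hkpos : 0 < k := by omega
      have hlt := pvHalfLt val h.2 h.1
      have horb : pvOrbit fuel val = val :: pvOrbit fuel k := by
        conv_lhs => rw [pvOrbit.eq_def]
        rw [if_neg h1, dif_neg (by simpa using h.1), dif_neg h.2, hfd]
      have hstrip : pvStripA val 0 = pvStripA k (0 + 1) := by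
        rw [pvStripA]; rw [dif_pos h, hfd]
      obtain ⟨e1, e2⟩ := stripA_shift k (0 + 1)
      obtain ⟨_, _, p3⟩ := stripA_props k hkpos
      rw [horb, hstrip, e1, e2]
      have ht : (0 + 1 + (pvStripA k 0).2).toNat = (pvStripA k 0).2.toNat + 1 := by omega
      rw [ht, List.replicate_succ]
      rw [pvSteps_cons val _ (pvOrbit_ne_nil fuel k), h.1]
      rw [ih _ (hm ▸ (hfd ▸ hlt)) k hkpos rfl]
      simp
    · have e : pvStripA val 0 = (val, 0) := by rw [pvStripA]; exact dif_neg h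
      rw [e]
      simp

theorem rle_replicate (k : Nat) : ∀ (r : Int) (acc : List Int) (t : List Int),
    List.foldl pvRleStep (some r, acc) (List.replicate k 0 ++ t)
      = List.foldl pvRleStep (some (r + k), acc) t := by
  induction k with
  | zero => intro r acc t; simp
  | succ k ih =>
    intro r acc t
    rw [List.replicate_succ, List.cons_append, List.foldl_cons]
    have hstep : pvRleStep (some r, acc) 0 = (some (r + 1), acc) := by
      simp [pvRleStep]
    rw [hstep, ih (r + 1) acc t]
    have e : r + 1 + (k : Int) = r + ((k + 1 : Nat) : Int) := by push_cast; ring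
    rw [e]

theorem rle_some_to_none (r : Int) (acc : List Int) (t : List Int)
    (h : t = [] ∨ ∃ t', t = 1 :: t') :
    pvFlush (List.foldl pvRleStep (some r, acc) t)
      = pvFlush (List.foldl pvRleStep (none, acc ++ [r]) t) := by
  rcases h with h | ⟨t', h⟩
  · subst h; simp [pvFlush]
  · subst h
    rw [List.foldl_cons, List.foldl_cons]
    have h1 : pvRleStep (some r, acc) 1 = (some 0, acc ++ [r]) := by
      simp [pvRleStep]
    have h2 : pvRleStep (none, acc ++ [r]) 1 = (some 0, acc ++ [r]) := by
      simp [pvRleStep]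
    rw [h1, h2]

theorem steps_head_odd (fuel : Nat) (m : Int) (hodd : PySem.Int.mod m 2 ≠ 0) :
    pvSteps (pvOrbit fuel m) = [] ∨ ∃ t, pvSteps (pvOrbit fuel m) = 1 :: t := by
  rw [pvOrbit.eq_def]
  by_cases h1 : m = 1
  · left; simp [h1, pvSteps]
  · rw [if_neg h1, dif_pos hodd]
    cases fuel with
    | zero => left; simp [pvSteps]
    | succ f =>
      right
      refine ⟨pvSteps (pvOrbit f (3 * m + 1)), ?_⟩
      rw [pvSteps_cons m _ (pvOrbit_ne_nil f (3 * m + 1))]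
      congr 1
      have := PySem.Int.mod_two_eq m
      omega

theorem loopA_merge (fuel : Nat) : ∀ (n : Int), 0 < n → ∀ (u d : Int) (acc : List Int),
    pvLoopA fuel n u d acc = pvMerge u d acc (pvOrbit fuel n) := by
  induction fuel using Nat.strong_induction_on with
  | _ fuel ihf =>
    intro n
    induction hm : n.natAbs using Nat.strong_induction_on generalizing n with
    | _ m ihn =>
      intro hn u d acc
      by_cases h1 : n = 1
      · subst h1
        rw [pvLoopA.eq_def, if_pos rfl, pvOrbit.eq_def, if_pos rfl]
        simp [pvMerge, pvSteps, pvFlush]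
      · by_cases he : PySem.Int.mod n 2 = 0
        · -- even step
          have hz : n ≠ 0 := by omega
          rw [pvLoopA.eq_def, if_neg h1, dif_pos he, dif_neg hz]
          rw [pvOrbit.eq_def, if_neg h1, dif_neg (by simpa using he), dif_neg hz]
          have hdvd := he
          rw [PySem.Int.mod_eq_zero_iff_dvd] at hdvd
          obtain ⟨k, hk⟩ := hdvd
          have hfd : PySem.Int.floordiv n 2 = k := by
            rw [hk, PySem.Int.floordiv_eq_ediv_of_pos (by omega), Int.mul_ediv_cancel_left _ (by omega)]
          have hkpos : 0 < k := by omega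
          have hlt := pvHalfLt n hz he
          rw [hfd, ihn _ (hm ▸ (hfd ▸ hlt)) k rfl hkpos u (d + 1) acc]
          simp only [pvMerge]
          rw [pvSteps_cons n _ (pvOrbit_ne_nil fuel k), he]
          have hstep : pvRleStep (none, acc) 0 = (none, acc) := by simp [pvRleStep]
          simp only [List.sum_cons, List.length_cons, List.foldl_cons, hstep]
          refine Prod.ext ?_ (Prod.ext ?_ ?_) <;> simp <;> push_cast <;> ring
        · -- odd step
          cases fuel with
          | zero =>
            rw [pvLoopA.eq_def, if_neg h1, dif_neg he]
            rw [pvOrbit.eq_def, if_neg h1, dif_pos he]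
            simp [pvMerge, pvSteps, pvFlush]
          | succ f =>
            rw [pvLoopA.eq_def, if_neg h1, dif_neg he]
            rw [pvOrbit.eq_def, if_neg h1, dif_pos he]
            simp only
            set s := pvStripA (3 * n + 1) 0 with hs
            have hval : (0 : Int) < 3 * n + 1 := by omega
            obtain ⟨p1, p2, p3⟩ := stripA_props (3 * n + 1) hval
            rw [← hs] at p1 p2 p3
            rw [ihf f (Nat.lt_succ_self f) s.1 p1 (u + 1) (d + s.2) (acc ++ [s.2])]
            simp only [pvMerge]
            rw [pvSteps_cons n _ (pvOrbit_ne_nil f (3 * n + 1))]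
            have hmod1 : PySem.Int.mod n 2 = 1 := by
              have := PySem.Int.mod_two_eq n; omega
            rw [hmod1, steps_strip (3 * n + 1) hval f, ← hs]
            simp only [List.foldl_cons, List.sum_cons, List.length_cons]
            have hstep1 : pvRleStep (none, acc) 1 = (some 0, acc) := by simp [pvRleStep]
            rw [hstep1, rle_replicate]
            have hcast : ((0 : Int) + (s.2.toNat : Int)) = s.2 := by omega
            rw [hcast, rle_some_to_none s.2 acc _ (steps_head_odd f s.1 p2)]
            refine Prod.ext ?_ (Prod.ext ?_ ?_) <;> simp <;> push_cast <;> omega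

-- ===== VERDICT (by name: the statement is the Claim_ definition above) =====
theorem collatz_orbit_detailed_spec : Claim_equal_collatz_orbit_detailed := by
  intro n _ hpre
  show collatz_orbit_detailed n = collatz_orbit_detailed_alt n
  have hn : (0 : Int) < n := hpre
  unfold collatz_orbit_detailed collatz_orbit_detailed_alt
  rw [loopA_merge pvFuel n hn 0 0 []]
  simp [pvMerge]
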